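-- pv_equiv track=rewrite | github.com/biowpn/MinimalCFG | python/CFG.py | eliminate_e_rules
-- ===== SOURCE A (Python) =====
-- def closure_e(G):
--     '''
--     get the set of nonterminals that may derive ''
--     '''
--     E = {''}
--     done = False
--     while not done:
--         done = True
--         for nt, subs in G:
--             if all([s in E for s in subs]) and nt not in E:
--                 E.add(nt)
--                 done = False
--     E.remove('')
--     return E
--
-- def eliminate_e_rules(G):
--     '''
--     e-rules:
--         A -> ''
--     assuming long rules have been eliminated.
--     '''
--     G_out = []
--     E = closure_e(G)
--
--     for nt, subs in G:
--         if len(subs) == 1: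
--             if subs[0] != '':
--                 G_out.append((nt, subs))
--         elif len(subs) == 2:
--             if subs[0] in E and nt != subs[1]:
--                 G_out.append((nt, [subs[1]]))
--             if subs[1] in E and nt != subs[0]:
--                 G_out.append((nt, [subs[0]]))
--             G_out.append((nt, subs))
--     return G_out
-- ===== SOURCE B (Python) =====
-- def eliminate_e_rules(G):
--     '''
--     e-rules:
--         A -> ''
--     assuming long rules have been eliminated.
--     Worklist nullable computation instead of repeated fixpoint passes:
--     per-rule counters of not-yet-nullable symbol occurrences, an occurrence
--     index from symbol to rules, and a stack of newly-nullable nonterminals.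
--     '''
--     n = len(G)
--     # one (symbol, rule-index) pair per non-epsilon symbol occurrence
--     pairs = [(s, i) for i, (nt, subs) in enumerate(G) for s in subs if s != '']
--     occ = {}
--     for s, i in pairs:
--         occ.setdefault(s, []).append(i)
--     # count[i] = number of symbol occurrences of rule i not yet known nullable
--     count = [len([s for s in subs if s != '']) for nt, subs in G]
--     nullable = set()
--     work = []
--     for i, (nt, subs) in enumerate(G):
--         if count[i] == 0 and nt != '' and nt not in nullable:
--             nullable.add(nt)
--             work.append(nt)
--     while work:
--         x = work.pop()
--         for i in occ.get(x, []):
--             count[i] -= 1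
--             if count[i] == 0:
--                 nt = G[i][0]
--                 if nt != '' and nt not in nullable:
--                     nullable.add(nt)
--                     work.append(nt)
--     G_out = []
--     for nt, subs in G:
--         if len(subs) == 1:
--             if subs[0] != '':
--                 G_out.append((nt, subs))
--         elif len(subs) == 2:
--             if subs[0] in nullable and nt != subs[1]:
--                 G_out.append((nt, [subs[1]]))
--             if subs[1] in nullable and nt != subs[0]:
--                 G_out.append((nt, [subs[0]]))
--             G_out.append((nt, subs))
--     return G_out
-- ===== Notes on version B (the rewrite author's own statement) =====
-- stated objective: alternative
-- what changed: A recomputes the nullable-set closure by repeated full passes over the grammar until a pass adds nothing; B computes the same set in one shot with a worklist of newly-nullable nonterminals, a per-symbol occurrence index and per-rule counters of not-yet-nullable symbol occurrences, then runs the identical output pass.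
import Mathlib
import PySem

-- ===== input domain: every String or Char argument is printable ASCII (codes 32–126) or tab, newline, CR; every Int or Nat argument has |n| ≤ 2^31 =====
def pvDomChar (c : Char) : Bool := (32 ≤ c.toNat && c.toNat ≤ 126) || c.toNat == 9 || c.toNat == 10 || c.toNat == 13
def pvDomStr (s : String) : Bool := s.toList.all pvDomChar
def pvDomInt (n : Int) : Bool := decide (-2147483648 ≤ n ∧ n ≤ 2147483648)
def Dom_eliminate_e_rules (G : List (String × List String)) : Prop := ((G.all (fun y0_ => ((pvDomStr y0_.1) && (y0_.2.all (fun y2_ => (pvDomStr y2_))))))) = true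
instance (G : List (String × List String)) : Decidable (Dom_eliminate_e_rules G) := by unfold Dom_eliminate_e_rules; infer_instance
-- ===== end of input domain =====

-- B replaces A's repeated fixpoint passes over the whole grammar by a one-shot worklist
-- nullable computation with per-rule counters of not-yet-nullable symbol occurrences
-- (a different algorithm computing the same nullable set; measured cost is similar).
-- The final output pass over G is textually identical in both Pythons, so both ports
-- share its transliteration `emitRules` (its set argument is the only difference).

-- ===== PORT A =====

-- shared transliteration of the identical output loop of both Pythons
-- ('for nt, subs in G: …' building G_out; E is the nullable set, used via 'in' only)
def emitRules (E : PySem.Set String) (G : List (String × List String)) : List (String × List String) :=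
  G.foldl (fun out r =>
    if r.2.length == 1 then
      (if (PySem.List.pyGetD r.2 0 "") != "" then out ++ [r] else out)
    else if r.2.length == 2 then
      let s0 := PySem.List.pyGetD r.2 0 ""
      let s1 := PySem.List.pyGetD r.2 1 ""
      let out1 := if PySem.Set.contains E s0 && r.1 != s1 then out ++ [(r.1, [s1])] else out
      let out2 := if PySem.Set.contains E s1 && r.1 != s0 then out1 ++ [(r.1, [s0])] else out1
      out2 ++ [r]
    else out) []

-- one 'for nt, subs in G' pass of closure_e's while-loop body (done := True at entry)
def aStep (st : PySem.Set String × Bool) (r : String × List String) : PySem.Set String × Bool :=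
  if (r.2.all (fun s => PySem.Set.contains st.1 s)) && !(PySem.Set.contains st.1 r.1) then
    (PySem.Set.add st.1 r.1, false)
  else st

-- 'while not done' loop; fuel G.length + 1 provably suffices (each non-final pass
-- adds at least one nonterminal of G to E), so this equals Python's unbounded loop
def aLoop (G : List (String × List String)) : Nat → PySem.Set String → PySem.Set String
  | 0, E => E
  | fuel+1, E =>
    let st := G.foldl aStep (E, true)
    if st.2 then st.1 else aLoop G fuel st.1

def closure_e (G : List (String × List String)) : PySem.Set String :=
  let E := aLoop G (G.length + 1) (PySem.Set.ofList [""])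
  -- E.remove(''): '' is always a member of E here, so remove never raises
  (PySem.Set.remove? E "").getD E

def eliminate_e_rules (G : List (String × List String)) : List (String × List String) :=
  emitRules (closure_e G) G

-- ===== PORT B =====

-- [(s, i) for i, (nt, subs) in enumerate(G) for s in subs if s != '']
def bPairs (G : List (String × List String)) : List (String × Int) :=
  (PySem.List.enumerate G 0).flatMap
    (fun p => (p.2.2.filter (fun s => s != "")).map (fun s => (s, p.1)))

-- occ = {}; for s, i in pairs: occ.setdefault(s, []).append(i)
def bOcc (G : List (String × List String)) : PySem.Dict String (List Int) :=
  (bPairs G).foldl (fun d p => d.modify p.1 [] (· ++ [p.2])) PySem.Dict.empty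

-- count = [len([s for s in subs if s != '']) for nt, subs in G]
def bCount0 (G : List (String × List String)) : List Int :=
  G.map (fun r => ((r.2.filter (fun s => s != "")).length : Int))

-- the initial seeding loop over enumerate(G)
def bInit (G : List (String × List String)) : PySem.Set String × List String :=
  (PySem.List.enumerate G 0).foldl (fun st p =>
    if PySem.List.pyGetD (bCount0 G) p.1 0 == 0 && p.2.1 != "" && !(PySem.Set.contains st.1 p.2.1)
    then (PySem.Set.add st.1 p.2.1, p.2.1 :: st.2) else st)
    (PySem.Set.empty, [])

-- body of 'for i in occ.get(x, []): …' (state: count, nullable, work; work head = stack top)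
def bStep (G : List (String × List String))
    (st : List Int × PySem.Set String × List String) (i : Int) :
    List Int × PySem.Set String × List String :=
  let count' := PySem.List.pySetD st.1 i (PySem.List.pyGetD st.1 i 0 - 1)
  if PySem.List.pyGetD count' i 0 == 0 then
    let nt := (PySem.List.pyGetD G i ("", [])).1
    if nt != "" && !(PySem.Set.contains st.2.1 nt) then
      (count', PySem.Set.add st.2.1 nt, nt :: st.2.2)
    else (count', st.2.1, st.2.2)
  else (count', st.2.1, st.2.2)

-- 'while work: x = work.pop(); …'; the stack is kept head-first (pop/append at the
-- head), which is Python's LIFO exactly; fuel |work| + |G| provably suffices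
def bLoop (G : List (String × List String)) :
    Nat → List Int × PySem.Set String × List String → PySem.Set String
  | 0, st => st.2.1
  | fuel+1, st =>
    match h : st.2.2 with
    | [] => st.2.1
    | x :: w' => bLoop G fuel (((bOcc G).getD x []).foldl (bStep G) (st.1, st.2.1, w'))

def bNullable (G : List (String × List String)) : PySem.Set String :=
  let iw := bInit G
  bLoop G (iw.2.length + G.length) (bCount0 G, iw.1, iw.2)

def eliminate_e_rules_alt (G : List (String × List String)) : List (String × List String) :=
  emitRules (bNullable G) G

-- ===== PRECONDITION & SPEC =====
def Spec_eliminate_e_rules (G : List (String × List String)) (out : List (String × List String)) : Prop := out = eliminate_e_rules_alt G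
instance (G : List (String × List String)) (out : List (String × List String)) : Decidable (Spec_eliminate_e_rules G out) := by unfold Spec_eliminate_e_rules; infer_instance

-- ===== CLAIM (what is proved, stated in full; the proofs are below) =====
def Claim_equal_eliminate_e_rules : Prop := ∀ (G : List (String × List String)), Dom_eliminate_e_rules G → Spec_eliminate_e_rules G (eliminate_e_rules G)

-- ===== LEMMAS AND PROOFS =====

-- the common semantic reference: x is a nullable symbol of G ('' counts as nullable)
inductive NullSym (G : List (String × List String)) : String → Prop
  | eps : NullSym G ""
  | step (nt : String) (subs : List String) :
      (nt, subs) ∈ G → (∀ s ∈ subs, NullSym G s) → NullSym G nt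

theorem contains_congr_of_mem_iff (E1 E2 : PySem.Set String)
    (h : ∀ s, s ∈ E1 ↔ s ∈ E2) (s : String) :
    PySem.Set.contains E1 s = PySem.Set.contains E2 s := by
  cases h1 : PySem.Set.contains E1 s <;> cases h2 : PySem.Set.contains E2 s <;> try rfl
  · exact absurd ((PySem.Set.contains_iff _ _).mp h2) (fun hm => by
      have := (PySem.Set.contains_iff _ _).mpr ((h s).mpr hm); rw [h1] at this; cases this)
  · exact absurd ((PySem.Set.contains_iff _ _).mp h1) (fun hm => by
      have := (PySem.Set.contains_iff _ _).mpr ((h s).mp hm); rw [h2] at this; cases this)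

theorem emitRules_congr (E1 E2 : PySem.Set String) (G : List (String × List String))
    (h : ∀ s, s ∈ E1 ↔ s ∈ E2) : emitRules E1 G = emitRules E2 G := by
  unfold emitRules
  have : (fun (out : List (String × List String)) (r : String × List String) =>
      if r.2.length == 1 then
        (if (PySem.List.pyGetD r.2 0 "") != "" then out ++ [r] else out)
      else if r.2.length == 2 then
        let s0 := PySem.List.pyGetD r.2 0 ""
        let s1 := PySem.List.pyGetD r.2 1 ""
        let out1 := if PySem.Set.contains E1 s0 && r.1 != s1 then out ++ [(r.1, [s1])] else out
        let out2 := if PySem.Set.contains E1 s1 && r.1 != s0 then out1 ++ [(r.1, [s0])] else out1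
        out2 ++ [r]
      else out)
      = (fun out r =>
      if r.2.length == 1 then
        (if (PySem.List.pyGetD r.2 0 "") != "" then out ++ [r] else out)
      else if r.2.length == 2 then
        let s0 := PySem.List.pyGetD r.2 0 ""
        let s1 := PySem.List.pyGetD r.2 1 ""
        let out1 := if PySem.Set.contains E2 s0 && r.1 != s1 then out ++ [(r.1, [s1])] else out
        let out2 := if PySem.Set.contains E2 s1 && r.1 != s0 then out1 ++ [(r.1, [s0])] else out1
        out2 ++ [r]
      else out) := by
    funext out r
    simp only [contains_congr_of_mem_iff E1 E2 h]
  rw [this]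

theorem aFold_mem_mono (l : List (String × List String)) :
    ∀ (st : PySem.Set String × Bool) (x : String), x ∈ st.1 → x ∈ (l.foldl aStep st).1 := by
  induction l with
  | nil => intro st x hx; simpa using hx
  | cons r l ih =>
    intro st x hx
    simp only [List.foldl_cons]
    apply ih
    unfold aStep
    split
    · exact (PySem.Set.mem_add _ _ _).mpr (Or.inl hx)
    · exact hx

theorem aFold_nodup (l : List (String × List String)) :
    ∀ (st : PySem.Set String × Bool), st.1.Nodup → (l.foldl aStep st).1.Nodup := by
  induction l with
  | nil => intro st h; simpa using h
  | cons r l ih =>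
    intro st h
    simp only [List.foldl_cons]
    apply ih
    unfold aStep
    split
    · exact PySem.Set.nodup_add _ _ h
    · exact h

theorem aFold_sound (G : List (String × List String)) (l : List (String × List String)) :
    ∀ (st : PySem.Set String × Bool), (∀ r ∈ l, r ∈ G) →
      (∀ y ∈ st.1, y = "" ∨ NullSym G y) →
      ∀ y ∈ (l.foldl aStep st).1, y = "" ∨ NullSym G y := by
  induction l with
  | nil => intro st _ hinv y hy; exact hinv y (by simpa using hy)
  | cons r l ih =>
    intro st hsub hinv y hy
    simp only [List.foldl_cons] at hy
    refine ih _ (fun r' hr' => hsub r' (by simp [hr'])) ?_ y hy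
    intro z hz
    unfold aStep at hz
    split at hz
    · rename_i hc
      rcases (PySem.Set.mem_add _ _ _).mp hz with h' | h'
      · exact hinv z h'
      · subst h'
        right
        refine NullSym.step r.1 r.2 (by have := hsub r (by simp); simpa using this) ?_
        intro s hs
        have hall := (Bool.and_eq_true _ _).mp hc |>.1
        have := (List.all_eq_true).mp hall s hs
        have hsmem : s ∈ st.1 := (PySem.Set.contains_iff _ _).mp this
        rcases hinv s hsmem with h | h
        · subst h; exact NullSym.eps
        · exact h
    · exact hinv z hz

theorem aFold_false (l : List (String × List String)) :
    ∀ (st : PySem.Set String × Bool), st.2 = false → (l.foldl aStep st).2 = false := by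
  induction l with
  | nil => intro st h; simpa using h
  | cons r l ih =>
    intro st h
    simp only [List.foldl_cons]
    apply ih
    unfold aStep
    split
    · rfl
    · exact h

theorem aFold_done (l : List (String × List String)) :
    ∀ (st : PySem.Set String × Bool), (l.foldl aStep st).2 = true →
      (l.foldl aStep st).1 = st.1 ∧ (∀ r ∈ l, (∀ s ∈ r.2, s ∈ st.1) → r.1 ∈ st.1) := by
  induction l with
  | nil => intro st h; exact ⟨rfl, by simp⟩
  | cons r l ih =>
    intro st h
    simp only [List.foldl_cons] at h ⊢
    by_cases hc : ((r.2.all (fun s => PySem.Set.contains st.1 s)) && !(PySem.Set.contains st.1 r.1)) = true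
    · exfalso
      have : (aStep st r).2 = false := by unfold aStep; rw [if_pos hc]
      have := aFold_false l _ this
      rw [this] at h; cases h
    · have hst : aStep st r = st := by unfold aStep; rw [if_neg hc]
      rw [hst] at h ⊢
      obtain ⟨h1, h2⟩ := ih st h
      refine ⟨h1, ?_⟩
      intro r' hr'
      rcases List.mem_cons.mp hr' with hr' | hr'
      · subst hr'
        intro hall
        by_contra hnt
        apply hc
        simp only [Bool.and_eq_true, Bool.not_eq_true', List.all_eq_true]
        constructor
        · intro s hs; exact (PySem.Set.contains_iff _ _).mpr (hall s hs)
        · cases hcon : PySem.Set.contains st.1 r'.1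
          · rfl
          · exact absurd ((PySem.Set.contains_iff _ _).mp hcon) hnt
      · exact h2 r' hr'

theorem aFold_progress (l : List (String × List String)) :
    ∀ (st : PySem.Set String × Bool), st.2 = true → (l.foldl aStep st).2 = false →
      ∃ x, x ∈ (l.foldl aStep st).1 ∧ x ∉ st.1 ∧ x ∈ l.map Prod.fst := by
  induction l with
  | nil => intro st h1 h2; simp at h1 h2; rw [h1] at h2; cases h2
  | cons r l ih =>
    intro st h1 h2
    simp only [List.foldl_cons] at h2 ⊢
    by_cases hc : ((r.2.all (fun s => PySem.Set.contains st.1 s)) && !(PySem.Set.contains st.1 r.1)) = true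
    · have hst : aStep st r = (PySem.Set.add st.1 r.1, false) := by unfold aStep; rw [if_pos hc]
      refine ⟨r.1, ?_, ?_, by simp⟩
      · apply aFold_mem_mono
        rw [hst]
        exact (PySem.Set.mem_add _ _ _).mpr (Or.inr rfl)
      · have := (Bool.and_eq_true _ _).mp hc |>.2
        simp only [Bool.not_eq_true'] at this
        intro hmem
        rw [(PySem.Set.contains_iff _ _).mpr hmem] at this
        cases this
    · have hst : aStep st r = st := by unfold aStep; rw [if_neg hc]
      rw [hst] at h2 ⊢
      obtain ⟨x, hx1, hx2, hx3⟩ := ih st h1 h2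
      exact ⟨x, hx1, hx2, by simp [hx3]⟩

theorem filter_length_lt {α : Type} (L : List α) (p q : α → Bool)
    (hpq : ∀ a, p a = true → q a = true) (a : α) (ha : a ∈ L)
    (hqa : q a = true) (hpa : p a = false) :
    (L.filter p).length < (L.filter q).length := by
  induction L with
  | nil => cases ha
  | cons b L ih =>
    rcases List.mem_cons.mp ha with hb | hb
    · subst hb
      have hle : (L.filter p).length ≤ (L.filter q).length := by
        simp only [← List.countP_eq_length_filter]
        exact List.countP_mono_left (fun x _ hx => hpq x hx)
      simp [hqa, hpa]
      omega
    · have := ih hb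
      by_cases hpb : p b = true
      · simp [hpb, hpq b hpb]; omega
      · rw [Bool.not_eq_true] at hpb
        by_cases hqb : q b = true
        · simp [hpb, hqb]; omega
        · rw [Bool.not_eq_true] at hqb
          simp [hpb, hqb]; omega

def mA (G : List (String × List String)) (E : PySem.Set String) : Nat :=
  (((G.map Prod.fst).dedup).filter (fun s => !(PySem.Set.contains E s))).length

theorem aLoop_spec (G : List (String × List String)) :
    ∀ (fuel : Nat) (E : PySem.Set String), mA G E < fuel →
      (∀ y ∈ E, y = "" ∨ NullSym G y) → E.Nodup →
      (∀ x ∈ E, x ∈ aLoop G fuel E) ∧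
      (∀ y ∈ aLoop G fuel E, y = "" ∨ NullSym G y) ∧
      (aLoop G fuel E).Nodup ∧
      (∀ r ∈ G, (∀ s ∈ r.2, s ∈ aLoop G fuel E) → r.1 ∈ aLoop G fuel E) := by
  intro fuel
  induction fuel with
  | zero => intro E h; omega
  | succ fuel ih =>
    intro E hm hinv hnd
    show _ ∧ _
    by_cases hd : (G.foldl aStep (E, true)).2 = true
    · have heq : aLoop G (fuel+1) E = E := by
        have h1 := (aFold_done G (E, true) hd).1
        simp only [aLoop, hd, if_true, h1]
      rw [heq]
      exact ⟨fun x hx => hx, hinv, hnd, (aFold_done G (E, true) hd).2⟩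
    · rw [Bool.not_eq_true] at hd
      have heq : aLoop G (fuel+1) E = aLoop G fuel (G.foldl aStep (E, true)).1 := by
        simp [aLoop, hd]
      obtain ⟨x, hx1, hx2, hx3⟩ := aFold_progress G (E, true) rfl hd
      have hmono : ∀ y ∈ E, y ∈ (G.foldl aStep (E, true)).1 := fun y hy => aFold_mem_mono G (E, true) y hy
      have hmlt : mA G (G.foldl aStep (E, true)).1 < mA G E := by
        apply filter_length_lt
        · intro a hpa
          simp only [Bool.not_eq_true'] at hpa
          simp only [Bool.not_eq_true']
          cases hqa : PySem.Set.contains E a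
          · rfl
          · exfalso
            have hmem : a ∈ (List.foldl aStep (E, true) G).1 :=
              hmono a ((PySem.Set.contains_iff _ _).mp hqa)
            rw [(PySem.Set.contains_iff _ _).mpr hmem] at hpa
            cases hpa
        · exact List.mem_dedup.mpr hx3
        · simp only [Bool.not_eq_true']
          cases hq : PySem.Set.contains E x
          · rfl
          · exact absurd ((PySem.Set.contains_iff _ _).mp hq) hx2
        · have hc1 := (PySem.Set.contains_iff _ _).mpr hx1
          simp [hc1, hx1]
      have ih' := ih (G.foldl aStep (E, true)).1 (by omega)
        (aFold_sound G G (E, true) (fun r hr => hr) hinv)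
        (aFold_nodup G (E, true) hnd)
      rw [heq]
      exact ⟨fun y hy => ih'.1 y (hmono y hy), ih'.2.1, ih'.2.2.1, ih'.2.2.2⟩

theorem mA_lt (G : List (String × List String)) (E : PySem.Set String) :
    mA G E < G.length + 1 := by
  have h1 : (((G.map Prod.fst).dedup).filter (fun s => !(PySem.Set.contains E s))).length
      ≤ ((G.map Prod.fst).dedup).length := List.length_filter_le _ _
  have h2 : ((G.map Prod.fst).dedup).length ≤ (G.map Prod.fst).length :=
    (List.dedup_sublist _).length_le
  simp only [List.length_map] at h2
  simp only [mA]
  omega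

theorem aE_char (G : List (String × List String)) (x : String) :
    x ∈ aLoop G (G.length + 1) (PySem.Set.ofList [""]) ↔ (x = "" ∨ NullSym G x) := by
  have h0 : (PySem.Set.ofList [""] : PySem.Set String) = [""] := rfl
  have hspec := aLoop_spec G (G.length + 1) (PySem.Set.ofList [""]) (mA_lt G _)
    (by intro y hy; rw [h0] at hy; simp at hy; exact Or.inl hy)
    (by rw [h0]; simp)
  obtain ⟨hmono, hsound, hnd, hclosed⟩ := hspec
  constructor
  · exact hsound x
  · rintro (h | h)
    · subst h; exact hmono "" (by rw [h0]; simp)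
    · induction h with
      | eps => exact hmono "" (by rw [h0]; simp)
      | step nt subs hmem hsubs ihsubs =>
        exact hclosed (nt, subs) hmem (fun s hs => ihsubs s hs)


theorem closure_e_char (G : List (String × List String)) (x : String) :
    x ∈ closure_e G ↔ (NullSym G x ∧ x ≠ "") := by
  have hmem : "" ∈ aLoop G (G.length + 1) (PySem.Set.ofList [""]) :=
    (aE_char G "").mpr (Or.inl rfl)
  have hres : closure_e G
      = (PySem.Set.remove? (aLoop G (G.length + 1) (PySem.Set.ofList [""])) "").getD
          (aLoop G (G.length + 1) (PySem.Set.ofList [""])) := rfl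
  rw [hres, PySem.Set.remove?_of_mem hmem, Option.getD_some]
  rw [PySem.Set.mem_discard]
  rw [aE_char G x]
  constructor
  · rintro ⟨h1 | h1, h2⟩
    · exact absurd h1 h2
    · exact ⟨h1, h2⟩
  · rintro ⟨h1, h2⟩
    exact ⟨Or.inr h1, h2⟩

-- ===== semantic quantities =====

def procP (nl : PySem.Set String) (w : List String) : String → Bool :=
  fun s => decide (s ∈ nl) && !(decide (s ∈ w))

def cnt (G : List (String × List String)) (pr : String → Bool) (j : Nat) : Nat :=
  ((bPairs G).filter (fun p => p.2 == (j : Int) && !(pr p.1))).length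

def mB (G : List (String × List String)) (nl : PySem.Set String) : Nat :=
  (((G.map Prod.fst).dedup).filter (fun s => !(decide (s ∈ nl)))).length

-- ===== basic lemmas =====

theorem mem_bPairs (G : List (String × List String)) (q : String × Int) :
    q ∈ bPairs G ↔ ∃ k : Nat, ∃ _ : k < G.length,
      q.1 ∈ G[k].2 ∧ q.1 ≠ "" ∧ q.2 = (k : Int) := by
  simp only [bPairs, List.mem_flatMap, PySem.List.mem_enumerate_iff]
  constructor
  · rintro ⟨p, ⟨k, hk, rfl⟩, hq⟩
    simp only [List.mem_map, List.mem_filter] at hq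
    obtain ⟨s, ⟨hs, hs'⟩, rfl⟩ := hq
    exact ⟨k, hk, by simpa using hs, by simpa using hs', by simp⟩
  · rintro ⟨k, hk, h1, h2, h3⟩
    refine ⟨((k : Int), G[k]), ⟨k, hk, by simp⟩, ?_⟩
    simp only [List.mem_map, List.mem_filter]
    exact ⟨q.1, ⟨h1, by simpa using h2⟩, by rw [← h3]⟩

theorem countP_split {α : Type} (l : List α) (p q : α → Bool) :
    l.countP p = l.countP (fun a => p a && q a) + l.countP (fun a => p a && !q a) := by
  induction l with
  | nil => rfl
  | cons b l ih =>
    simp only [List.countP_cons]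
    cases hp : p b <;> cases hq : q b <;> simp [hp, hq] <;> omega

theorem cnt_congr (G : List (String × List String)) (pr1 pr2 : String → Bool)
    (h : ∀ s, pr1 s = pr2 s) (j : Nat) : cnt G pr1 j = cnt G pr2 j := by
  simp only [cnt]
  congr 1
  apply List.filter_congr
  intro p _
  rw [h p.1]

theorem filter_length_update {α : Type} (L : List α) (hnd : L.Nodup)
    (p q : α → Bool) (a : α) (ha : a ∈ L) (hpa : p a = true) (hqa : q a = false)
    (hcong : ∀ b, b ≠ a → p b = q b) :
    (L.filter p).length = (L.filter q).length + 1 := by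
  induction L with
  | nil => cases ha
  | cons b L ih =>
    rcases List.mem_cons.mp ha with hb | hb
    · subst hb
      have hnotin : a ∉ L := (List.nodup_cons.mp hnd).1
      have : L.filter p = L.filter q := by
        apply List.filter_congr
        intro c hc
        exact hcong c (fun hce => hnotin (hce ▸ hc))
      simp [List.filter_cons, hpa, hqa, this]
    · have hba : b ≠ a := fun hce => (List.nodup_cons.mp hnd).1 (hce ▸ hb)
      have := ih (List.nodup_cons.mp hnd).2 hb
      by_cases hpb : p b = true
      · simp [hpb, (hcong b hba) ▸ hpb, this]
      · rw [Bool.not_eq_true] at hpb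
        simp [List.filter_cons, hpb, (hcong b hba) ▸ hpb, this]

theorem enum_flatMap_filter_idx (L : List (String × List String)) :
    ∀ (s j : Int),
      ((PySem.List.enumerate L s).flatMap
        (fun p => (p.2.2.filter (fun t => t != "")).map (fun t => (t, p.1)))).filter
          (fun p => p.2 == j)
      = if s ≤ j ∧ j < s + L.length then
          ((L.getD (j - s).toNat ("", [])).2.filter (fun t => t != "")).map (fun t => (t, j))
        else [] := by
  induction L with
  | nil =>
    intro s j
    rw [if_neg (by rintro ⟨h1, h2⟩; simp at h2; omega)]
    simp [PySem.List.enumerate]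
  | cons r L ih =>
    intro s j
    rw [PySem.List.enumerate_cons, List.flatMap_cons, List.filter_append, ih (s+1) j]
    by_cases hsj : j = s
    · subst hsj
      rw [if_neg (by rintro ⟨h1, _⟩; omega)]
      have h1 : (j - j).toNat = 0 := by omega
      rw [if_pos (by refine ⟨le_refl _, ?_⟩; simp)]
      simp only [h1, List.getD_cons_zero, List.append_nil]
      rw [List.filter_map]
      have : ((fun p => p.2 == j) ∘ (fun t => ((t : String), j))) = (fun _ => true) := by
        funext t; simp
      rw [this, List.filter_true]
    · have hchunk : ((r.2.filter (fun t => t != "")).map (fun t => (t, s))).filter (fun p => p.2 == j) = [] := by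
        rw [List.filter_map]
        have : ((fun p => p.2 == j) ∘ (fun t => ((t : String), s))) = (fun _ => false) := by
          funext t; simp; omega
        rw [this, List.filter_false, List.map_nil]
      rw [hchunk, List.nil_append]
      by_cases hc : s + 1 ≤ j ∧ j < s + 1 + L.length
      · rw [if_pos hc, if_pos (by simp; omega)]
        have hidx : (j - s).toNat = (j - (s+1)).toNat + 1 := by omega
        rw [hidx, List.getD_cons_succ]
      · rw [if_neg hc, if_neg (by simp; omega)]

theorem bPairs_filter_idx (G : List (String × List String)) (j : Nat) (hj : j < G.length) :
    (bPairs G).filter (fun p => p.2 == (j : Int))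
      = (G[j].2.filter (fun t => t != "")).map (fun t => (t, (j : Int))) := by
  rw [bPairs, enum_flatMap_filter_idx G 0 (j : Int),
    if_pos (by refine ⟨by omega, ?_⟩; omega)]
  have h0 : ((j : Int) - 0).toNat = j := by omega
  rw [h0, List.getD_eq_getElem _ _ hj]

theorem bOcc_getD (G : List (String × List String)) (x : String) :
    (bOcc G).getD x [] = ((bPairs G).filter (fun p => p.1 == x)).map (fun p => p.2) := by
  rw [bOcc, PySem.Dict.getD_foldl_modify_append]
  simp

theorem occ_count (G : List (String × List String)) (x : String) (j : Nat) :
    ((bOcc G).getD x []).count (j : Int)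
      = ((bPairs G).filter (fun p => p.2 == (j : Int) && p.1 == x)).length := by
  rw [bOcc_getD, List.count_eq_countP, List.countP_map, List.countP_filter,
    ← List.countP_eq_length_filter]
  apply List.countP_congr
  intro p _
  constructor
  · intro h
    simp only [Function.comp, Bool.and_eq_true, beq_iff_eq] at h ⊢
    tauto
  · intro h
    simp only [Function.comp, Bool.and_eq_true, beq_iff_eq] at h ⊢
    tauto

theorem occ_mem_valid (G : List (String × List String)) (x : String) :
    ∀ i ∈ (bOcc G).getD x [], ∃ k : Nat, k < G.length ∧ i = (k : Int) := by
  intro i hi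
  rw [bOcc_getD] at hi
  obtain ⟨p, hp, rfl⟩ := List.mem_map.mp hi
  obtain ⟨k, hk, _, _, h3⟩ := (mem_bPairs G p).mp (List.mem_filter.mp hp).1
  exact ⟨k, hk, h3⟩

theorem countP_congrB {α : Type} (l : List α) {p q : α → Bool}
    (h : ∀ a ∈ l, p a = q a) : l.countP p = l.countP q :=
  List.countP_congr (fun a ha => by rw [h a ha])

theorem cnt_pop (G : List (String × List String)) (nl : PySem.Set String)
    (w : List String) (x : String) (hx1 : x ∈ nl) (hx2 : x ∉ w) (j : Nat) :
    cnt G (procP nl (x :: w)) j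
      = cnt G (procP nl w) j + ((bOcc G).getD x []).count (j : Int) := by
  rw [occ_count]
  simp only [cnt, ← List.countP_eq_length_filter]
  rw [countP_split (bPairs G) (fun p => p.2 == (j:Int) && !(procP nl (x :: w) p.1)) (fun p => p.1 == x)]
  rw [countP_split (bPairs G) (fun p => p.2 == (j:Int) && !(procP nl w p.1)) (fun p => p.1 == x)]
  have e1 : ∀ p ∈ bPairs G,
      ((p.2 == (j:Int) && !(procP nl (x :: w) p.1)) && p.1 == x) = (p.2 == (j:Int) && p.1 == x) := by
    intro p _
    by_cases hpx : p.1 = x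
    · have hf : procP nl (x :: w) p.1 = false := by
        simp [procP, hpx]
      rw [hf, hpx]
      simp
    · have hb : (p.1 == x) = false := beq_eq_false_iff_ne.mpr hpx
      rw [hb]
      simp
  have e2 : List.countP (fun p => (p.2 == (j:Int) && !(procP nl w p.1)) && p.1 == x) (bPairs G) = 0 := by
    rw [List.countP_eq_zero]
    intro p _
    by_cases hpx : p.1 = x
    · have ht : procP nl w p.1 = true := by simp [procP, hpx, hx1, hx2]
      rw [ht]
      simp
    · have hb : (p.1 == x) = false := beq_eq_false_iff_ne.mpr hpx
      rw [hb]
      simp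
  have e3 : ∀ p ∈ bPairs G,
      ((p.2 == (j:Int) && !(procP nl (x :: w) p.1)) && !(p.1 == x))
        = ((p.2 == (j:Int) && !(procP nl w p.1)) && !(p.1 == x)) := by
    intro p _
    by_cases hpx : p.1 = x
    · simp [hpx]
    · have : procP nl (x :: w) p.1 = procP nl w p.1 := by
        simp [procP, hpx]
      rw [this]
  rw [countP_congrB _ e1, countP_congrB _ e3, e2]
  omega

theorem procP_push (nl : PySem.Set String) (w : List String) (nt : String)
    (h : nt ∉ nl) : ∀ s, procP (PySem.Set.add nl nt) (nt :: w) s = procP nl w s := by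
  intro s
  by_cases hs : s = nt
  · subst hs
    simp [procP, h, PySem.Set.mem_add]
  · simp [procP, PySem.Set.mem_add, hs]

theorem getElem_pair_mem (G : List (String × List String)) (j : Nat) (hj : j < G.length) :
    (G[j].1, G[j].2) ∈ G := by
  have := List.getElem_mem hj
  simpa using this

theorem cnt_zero_null (G : List (String × List String)) (nl : PySem.Set String)
    (w : List String) (hinv : ∀ y ∈ nl, NullSym G y ∧ y ≠ "")
    (j : Nat) (hj : j < G.length) (h : cnt G (procP nl w) j = 0) :
    NullSym G (G[j].1) := by
  have hfil := List.filter_eq_nil_iff.mp (List.length_eq_zero_iff.mp h)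
  refine NullSym.step G[j].1 G[j].2 (getElem_pair_mem G j hj) ?_
  intro s hs
  by_cases hse : s = ""
  · subst hse; exact NullSym.eps
  · have hpmem : ((s, (j:Int)) : String × Int) ∈ bPairs G :=
      (mem_bPairs G (s, (j:Int))).mpr ⟨j, hj, hs, hse, rfl⟩
    have hns := hfil _ hpmem
    have hpr : procP nl w s = true := by
      cases hpr : procP nl w s
      · exact absurd (by simp [hpr]) hns
      · rfl
    have hmem : s ∈ nl := by
      simp only [procP, Bool.and_eq_true, decide_eq_true_eq] at hpr
      exact hpr.1
    exact (hinv s hmem).1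

theorem cnt_final_zero (G : List (String × List String)) (nl : PySem.Set String)
    (j : Nat) (hj : j < G.length) (h : ∀ s ∈ G[j].2, s = "" ∨ s ∈ nl) :
    cnt G (procP nl []) j = 0 := by
  simp only [cnt, List.length_eq_zero_iff]
  rw [List.filter_eq_nil_iff]
  intro p hp
  obtain ⟨k, hk, h1, h2, h3⟩ := (mem_bPairs G p).mp hp
  intro hc
  simp only [Bool.and_eq_true, beq_iff_eq, Bool.not_eq_true'] at hc
  have hkj : k = j := by
    have := hc.1; rw [h3] at this; exact_mod_cast this
  subst hkj
  rcases h p.1 h1 with he | hm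
  · exact h2 he
  · have : procP nl [] p.1 = true := by simp [procP, hm]
    rw [this] at hc
    cases hc.2

theorem cnt_all_unprocessed (G : List (String × List String)) (nl : PySem.Set String)
    (w : List String) (hpr : ∀ s, procP nl w s = false) (j : Nat) (hj : j < G.length) :
    (cnt G (procP nl w) j : Int) = (bCount0 G).getD j 0 := by
  have h1 : cnt G (procP nl w) j = ((bPairs G).filter (fun p => p.2 == (j:Int))).length := by
    simp only [cnt, ← List.countP_eq_length_filter]
    apply List.countP_congr
    intro p _
    rw [hpr p.1]
    simp
  rw [h1, bPairs_filter_idx G j hj, List.length_map]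
  have hlen : j < (bCount0 G).length := by simp [bCount0, hj]
  rw [List.getD_eq_getElem _ _ hlen]
  simp [bCount0]

def FInv (G : List (String × List String)) (l : List Int)
    (st : List Int × PySem.Set String × List String) : Prop :=
  (∀ y ∈ st.2.1, NullSym G y ∧ y ≠ "") ∧
  st.2.2.Nodup ∧ (∀ y ∈ st.2.2, y ∈ st.2.1) ∧ st.2.1.Nodup ∧
  st.1.length = G.length ∧
  (∀ j : Nat, j < G.length →
    st.1.getD j 0 = ((cnt G (procP st.2.1 st.2.2) j + l.count (j : Int) : Nat) : Int)) ∧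
  (∀ j : Nat, (h : j < G.length) → st.1.getD j 0 = 0 → (G[j].1 = "" ∨ G[j].1 ∈ st.2.1))

theorem bStep_spec (G : List (String × List String))
    (st : List Int × PySem.Set String × List String) (k : Nat) (hk : k < G.length)
    (l' : List Int) (h : FInv G ((k : Int) :: l') st) :
    FInv G l' (bStep G st (k : Int)) ∧
    (bStep G st (k : Int)).2.2.length + mB G (bStep G st (k : Int)).2.1
      = st.2.2.length + mB G st.2.1 ∧
    (∀ y ∈ st.2.1, y ∈ (bStep G st (k : Int)).2.1) := by
  obtain ⟨count, nl, w⟩ := st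
  obtain ⟨h1, h2, h3, h4, h5, h6, h7⟩ := h
  simp only at h1 h2 h3 h4 h5 h6 h7
  -- the new count list
  have hset : PySem.List.pySetD count (k : Int) (PySem.List.pyGetD count (k : Int) 0 - 1)
      = count.set k (count.getD k 0 - 1) := by
    rw [PySem.List.pyGetD_natCast, PySem.List.pySetD_natCast]
  have hklen : k < count.length := by omega
  have hgetset : ∀ j : Nat, (count.set k (count.getD k 0 - 1)).getD j 0
      = if j = k then count.getD k 0 - 1 else count.getD j 0 := by
    intro j
    have := PySem.List.pyGetD_pySetD_natCast count k j (count.getD k 0 - 1) 0 hklen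
    rw [PySem.List.pySetD_natCast] at this
    rw [← PySem.List.pyGetD_natCast count j 0, ← this, PySem.List.pyGetD_natCast]
  have hck : count.getD k 0 = ((cnt G (procP nl w) k + ((k:Int) :: l').count (k : Int) : Nat) : Int) :=
    h6 k hk
  have hcount_cons : ((k:Int) :: l').count (k : Int) = l'.count (k : Int) + 1 := by
    simp [List.count_cons_self]
  have hv : count.getD k 0 - 1 = ((cnt G (procP nl w) k + l'.count (k : Int) : Nat) : Int) := by
    rw [hck, hcount_cons]
    push_cast
    ring
  -- count values of the new list, in invariant form
  have hnew : ∀ j : Nat, j < G.length →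
      (count.set k (count.getD k 0 - 1)).getD j 0
        = ((cnt G (procP nl w) j + l'.count (j : Int) : Nat) : Int) := by
    intro j hj
    rw [hgetset j]
    by_cases hjk : j = k
    · rw [if_pos hjk, hjk, hv]
    · rw [if_neg hjk, h6 j hj]
      have : ((k:Int) :: l').count (j : Int) = l'.count (j : Int) := by
        rw [List.count_cons_of_ne]
        intro hc
        exact hjk (by exact_mod_cast hc.symm)
      rw [this]
  have hlen' : (count.set k (count.getD k 0 - 1)).length = G.length := by
    simp [h5]
  -- evaluate the port's branch condition
  have htest : PySem.List.pyGetD (PySem.List.pySetD count (k : Int) (PySem.List.pyGetD count (k : Int) 0 - 1)) (k : Int) 0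
      = ((cnt G (procP nl w) k + l'.count (k : Int) : Nat) : Int) := by
    rw [hset, PySem.List.pyGetD_natCast, hgetset k, if_pos rfl, hv]
  have hnt : (PySem.List.pyGetD G (k : Int) ("", [])).1 = G[k].1 := by
    rw [PySem.List.pyGetD_natCast, List.getD_eq_getElem _ _ hk]
  by_cases hz : cnt G (procP nl w) k + l'.count (k : Int) = 0
  · -- the counter reaches zero: rule k has fired
    have hz1 : cnt G (procP nl w) k = 0 := by omega
    have hz2 : l'.count (k : Int) = 0 := by omega
    have hNull : NullSym G (G[k].1) := cnt_zero_null G nl w h1 k hk hz1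
    have hcond : (PySem.List.pyGetD (PySem.List.pySetD count (k : Int) (PySem.List.pyGetD count (k : Int) 0 - 1)) (k : Int) 0 == 0) = true := by
      rw [htest, hz]
      rfl
    by_cases hg : ((G[k].1 != "") && !(PySem.Set.contains nl (G[k].1))) = true
    · -- push branch
      have hgne : G[k].1 ≠ "" := by
        have := (Bool.and_eq_true _ _).mp hg |>.1
        simpa using this
      have hgnm : G[k].1 ∉ nl := by
        have := (Bool.and_eq_true _ _).mp hg |>.2
        intro hm
        rw [(PySem.Set.contains_iff _ _).mpr hm] at this
        cases this
      have hstep : bStep G (count, nl, w) (k : Int)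
          = (count.set k (count.getD k 0 - 1), PySem.Set.add nl (G[k].1), G[k].1 :: w) := by
        unfold bStep
        simp only [hcond, if_true]
        rw [hnt]
        simp only [hg, if_true, hset]
      rw [hstep]
      have hwm : G[k].1 ∉ w := fun hm => hgnm (h3 _ hm)
      have hproc : ∀ s, procP (PySem.Set.add nl (G[k].1)) (G[k].1 :: w) s = procP nl w s :=
        procP_push nl w _ hgnm
      refine ⟨⟨?_, ?_, ?_, ?_, ?_, ?_, ?_⟩, ?_, ?_⟩
      · intro y hy
        rcases (PySem.Set.mem_add _ _ _).mp hy with hy | hy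
        · exact h1 y hy
        · subst hy; exact ⟨hNull, hgne⟩
      · exact List.nodup_cons.mpr ⟨hwm, h2⟩
      · intro y hy
        rcases List.mem_cons.mp hy with hy | hy
        · subst hy; exact (PySem.Set.mem_add _ _ _).mpr (Or.inr rfl)
        · exact (PySem.Set.mem_add _ _ _).mpr (Or.inl (h3 y hy))
      · exact PySem.Set.nodup_add _ _ h4
      · exact hlen'
      · intro j hj
        rw [hnew j hj, cnt_congr G _ _ hproc j]
      · intro j hj hval
        by_cases hjk : j = k
        · subst hjk
          exact Or.inr ((PySem.Set.mem_add _ _ _).mpr (Or.inr rfl))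
        · rw [hgetset j, if_neg hjk] at hval
          rcases h7 j hj hval with hc | hc
          · exact Or.inl hc
          · exact Or.inr ((PySem.Set.mem_add _ _ _).mpr (Or.inl hc))
      · -- measure bookkeeping: one push, one new nullable
        simp only [List.length_cons]
        have hmem : G[k].1 ∈ (G.map Prod.fst).dedup :=
          List.mem_dedup.mpr (List.mem_map.mpr ⟨G[k], List.getElem_mem hk, rfl⟩)
        have := filter_length_update ((G.map Prod.fst).dedup) (List.nodup_dedup _)
          (fun s => !(decide (s ∈ nl))) (fun s => !(decide (s ∈ PySem.Set.add nl (G[k].1))))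
          (G[k].1) hmem (by simp [hgnm]) (by simp [PySem.Set.mem_add])
          (fun b hb => by simp [PySem.Set.mem_add, hb])
        simp only [mB]
        omega
      · intro y hy
        exact (PySem.Set.mem_add _ _ _).mpr (Or.inl hy)
    · -- counter fired but the guard rejects: nt = '' or already nullable
      have hgf : ((G[k].1 != "") && !(PySem.Set.contains nl (G[k].1))) = false := by
        cases hb : ((G[k].1 != "") && !(PySem.Set.contains nl (G[k].1)))
        · rfl
        · exact absurd hb hg
      have hstep : bStep G (count, nl, w) (k : Int)
          = (count.set k (count.getD k 0 - 1), nl, w) := by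
        unfold bStep
        simp only [hcond, if_true]
        rw [hnt]
        simp only [hgf, Bool.false_eq_true, if_false, hset]
      rw [hstep]
      have hgt : G[k].1 = "" ∨ G[k].1 ∈ nl := by
        by_cases he : G[k].1 = ""
        · exact Or.inl he
        · right
          have h1' : (G[k].1 != "") = true := by simpa using he
          rw [h1'] at hgf
          simp only [Bool.true_and] at hgf
          cases hc : PySem.Set.contains nl (G[k].1)
          · rw [hc] at hgf
            exact absurd hgf (by simp)
          · exact (PySem.Set.contains_iff _ _).mp hc
      refine ⟨⟨h1, h2, h3, h4, hlen', ?_, ?_⟩, by simp, fun y hy => hy⟩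
      · exact hnew
      · intro j hj hval
        by_cases hjk : j = k
        · subst hjk; exact hgt
        · rw [hgetset j, if_neg hjk] at hval
          exact h7 j hj hval
  · -- counter still positive
    have hcond : (PySem.List.pyGetD (PySem.List.pySetD count (k : Int) (PySem.List.pyGetD count (k : Int) 0 - 1)) (k : Int) 0 == 0) = false := by
      rw [htest]
      simp only [beq_eq_false_iff_ne, ne_eq]
      intro hc
      exact hz (by exact_mod_cast hc)
    have hstep : bStep G (count, nl, w) (k : Int)
        = (count.set k (count.getD k 0 - 1), nl, w) := by
      unfold bStep
      simp only [hcond, Bool.false_eq_true, if_false]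
      rw [hset]
    rw [hstep]
    refine ⟨⟨h1, h2, h3, h4, hlen', hnew, ?_⟩, by simp, fun y hy => hy⟩
    intro j hj hval
    by_cases hjk : j = k
    · subst hjk
      rw [hgetset j, if_pos rfl, hv] at hval
      exfalso
      apply hz
      exact_mod_cast hval
    · rw [hgetset j, if_neg hjk] at hval
      exact h7 j hj hval

theorem bFold_spec (G : List (String × List String)) :
    ∀ (l : List Int) (st : List Int × PySem.Set String × List String),
      FInv G l st → (∀ i ∈ l, ∃ k : Nat, k < G.length ∧ i = (k : Int)) →
      FInv G [] (l.foldl (bStep G) st) ∧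
      (l.foldl (bStep G) st).2.2.length + mB G (l.foldl (bStep G) st).2.1
        = st.2.2.length + mB G st.2.1 ∧
      (∀ y ∈ st.2.1, y ∈ (l.foldl (bStep G) st).2.1) := by
  intro l
  induction l with
  | nil => intro st h _; exact ⟨h, rfl, fun y hy => hy⟩
  | cons i l ih =>
    intro st h hval
    obtain ⟨k, hk, rfl⟩ := hval i (by simp)
    obtain ⟨hF, hM, hmono⟩ := bStep_spec G st k hk l h
    obtain ⟨hF', hM', hmono'⟩ := ih (bStep G st (k : Int)) hF
      (fun i hi => hval i (by simp [hi]))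
    refine ⟨by simpa using hF', ?_, ?_⟩
    · simp only [List.foldl_cons]
      omega
    · intro y hy
      simp only [List.foldl_cons]
      exact hmono' y (hmono y hy)

theorem bLoop_spec (G : List (String × List String)) :
    ∀ (fuel : Nat) (st : List Int × PySem.Set String × List String),
      FInv G [] st → st.2.2.length + mB G st.2.1 ≤ fuel →
      (∀ y ∈ bLoop G fuel st, NullSym G y ∧ y ≠ "") ∧
      (∀ j : Nat, (hj : j < G.length) →
        (∀ s ∈ G[j].2, s = "" ∨ s ∈ bLoop G fuel st) →
        (G[j].1 = "" ∨ G[j].1 ∈ bLoop G fuel st)) ∧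
      (bLoop G fuel st).Nodup ∧ (∀ y ∈ st.2.1, y ∈ bLoop G fuel st) := by
  intro fuel
  induction fuel with
  | zero =>
    intro st h hm
    obtain ⟨count, nl, w⟩ := st
    obtain ⟨h1, h2, h3, h4, h5, h6, h7⟩ := h
    simp only at h1 h2 h3 h4 h5 h6 h7 hm
    have hw : w = [] := List.length_eq_zero_iff.mp (by omega)
    subst hw
    have hres : bLoop G 0 (count, nl, []) = nl := rfl
    rw [hres]
    refine ⟨h1, ?_, h4, fun y hy => hy⟩
    intro j hj hsubs
    have hcnt : cnt G (procP nl []) j = 0 := cnt_final_zero G nl j hj hsubs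
    have := h6 j hj
    rw [hcnt] at this
    simp at this
    exact h7 j hj this
  | succ fuel ih =>
    intro st h hm
    obtain ⟨count, nl, w⟩ := st
    cases w with
    | nil =>
      obtain ⟨h1, h2, h3, h4, h5, h6, h7⟩ := h
      simp only at h1 h2 h3 h4 h5 h6 h7 hm
      have hres : bLoop G (fuel+1) (count, nl, []) = nl := rfl
      rw [hres]
      refine ⟨h1, ?_, h4, fun y hy => hy⟩
      intro j hj hsubs
      have hcnt : cnt G (procP nl []) j = 0 := cnt_final_zero G nl j hj hsubs
      have := h6 j hj
      rw [hcnt] at this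
      simp at this
      exact h7 j hj this
    | cons x w' =>
      obtain ⟨h1, h2, h3, h4, h5, h6, h7⟩ := h
      simp only at h1 h2 h3 h4 h5 h6 h7 hm
      have hres : bLoop G (fuel+1) (count, nl, x :: w')
          = bLoop G fuel (((bOcc G).getD x []).foldl (bStep G) (count, nl, w')) := rfl
      have hx1 : x ∈ nl := h3 x (by simp)
      have hx2 : x ∉ w' := (List.nodup_cons.mp h2).1
      have hF : FInv G ((bOcc G).getD x []) (count, nl, w') := by
        refine ⟨h1, (List.nodup_cons.mp h2).2, fun y hy => h3 y (by simp [hy]), h4, h5, ?_, h7⟩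
        intro j hj
        rw [h6 j hj]
        congr 1
        have := cnt_pop G nl w' x hx1 hx2 j
        simp only [List.count_nil] at *
        omega
      obtain ⟨hF', hM', hmono'⟩ := bFold_spec G ((bOcc G).getD x []) (count, nl, w') hF
        (occ_mem_valid G x)
      rw [hres]
      have hm' : (((bOcc G).getD x []).foldl (bStep G) (count, nl, w')).2.2.length
          + mB G (((bOcc G).getD x []).foldl (bStep G) (count, nl, w')).2.1 ≤ fuel := by
        simp only at hM'
        simp only [List.length_cons] at hm
        omega
      obtain ⟨c1, c2, c3, c4⟩ := ih _ hF' hm'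
      exact ⟨c1, c2, c3, fun y hy => c4 y (hmono' y hy)⟩

theorem count0_zero_null (G : List (String × List String)) (k : Nat) (hk : k < G.length)
    (h : (bCount0 G).getD k 0 = 0) : NullSym G (G[k].1) := by
  have hlen : k < (bCount0 G).length := by simp [bCount0, hk]
  rw [List.getD_eq_getElem _ _ hlen] at h
  simp only [bCount0, List.getElem_map] at h
  have hnil : G[k].2.filter (fun s => s != "") = [] := by
    have : (G[k].2.filter (fun s => s != "")).length = 0 := by exact_mod_cast h
    exact List.length_eq_zero_iff.mp this
  refine NullSym.step G[k].1 G[k].2 (getElem_pair_mem G k hk) ?_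
  intro s hs
  have := List.filter_eq_nil_iff.mp hnil s hs
  have hse : s = "" := by simpa using this
  subst hse
  exact NullSym.eps

theorem bInitFold_spec (G : List (String × List String)) :
    ∀ (l : List (Int × (String × List String))) (st : PySem.Set String × List String),
      (∀ p ∈ l, ∃ k : Nat, ∃ _ : k < G.length, p = ((k : Int), G[k])) →
      st.1.Nodup → st.2.Nodup → (∀ y, y ∈ st.1 ↔ y ∈ st.2) →
      (∀ y ∈ st.1, NullSym G y ∧ y ≠ "") →
      (l.foldl (fun st p =>
        if PySem.List.pyGetD (bCount0 G) p.1 0 == 0 && p.2.1 != "" && !(PySem.Set.contains st.1 p.2.1)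
        then (PySem.Set.add st.1 p.2.1, p.2.1 :: st.2) else st) st).1.Nodup ∧
      (l.foldl (fun st p =>
        if PySem.List.pyGetD (bCount0 G) p.1 0 == 0 && p.2.1 != "" && !(PySem.Set.contains st.1 p.2.1)
        then (PySem.Set.add st.1 p.2.1, p.2.1 :: st.2) else st) st).2.Nodup ∧
      (∀ y, y ∈ (l.foldl (fun st p =>
        if PySem.List.pyGetD (bCount0 G) p.1 0 == 0 && p.2.1 != "" && !(PySem.Set.contains st.1 p.2.1)
        then (PySem.Set.add st.1 p.2.1, p.2.1 :: st.2) else st) st).1 ↔ y ∈ (l.foldl (fun st p =>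
        if PySem.List.pyGetD (bCount0 G) p.1 0 == 0 && p.2.1 != "" && !(PySem.Set.contains st.1 p.2.1)
        then (PySem.Set.add st.1 p.2.1, p.2.1 :: st.2) else st) st).2) ∧
      (∀ y ∈ (l.foldl (fun st p =>
        if PySem.List.pyGetD (bCount0 G) p.1 0 == 0 && p.2.1 != "" && !(PySem.Set.contains st.1 p.2.1)
        then (PySem.Set.add st.1 p.2.1, p.2.1 :: st.2) else st) st).1, NullSym G y ∧ y ≠ "") ∧
      (∀ y ∈ st.1, y ∈ (l.foldl (fun st p =>
        if PySem.List.pyGetD (bCount0 G) p.1 0 == 0 && p.2.1 != "" && !(PySem.Set.contains st.1 p.2.1)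
        then (PySem.Set.add st.1 p.2.1, p.2.1 :: st.2) else st) st).1) ∧
      (∀ p ∈ l, (PySem.List.pyGetD (bCount0 G) p.1 0 == 0) = true →
        (p.2.1 = "" ∨ p.2.1 ∈ (l.foldl (fun st p =>
        if PySem.List.pyGetD (bCount0 G) p.1 0 == 0 && p.2.1 != "" && !(PySem.Set.contains st.1 p.2.1)
        then (PySem.Set.add st.1 p.2.1, p.2.1 :: st.2) else st) st).1)) := by
  intro l
  induction l with
  | nil =>
    intro st _ hn1 hn2 hiff hsound
    exact ⟨hn1, hn2, hiff, hsound, fun y hy => hy, by simp⟩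
  | cons p l ih =>
    intro st hval hn1 hn2 hiff hsound
    obtain ⟨k, hk, rfl⟩ := hval p (by simp)
    simp only [List.foldl_cons]
    by_cases hc : (PySem.List.pyGetD (bCount0 G) ((k:Int), G[k]).1 0 == 0
        && (((k:Int), G[k]).2.1 != "") && !(PySem.Set.contains st.1 ((k:Int), G[k]).2.1)) = true
    · rw [if_pos hc]
      simp only [Bool.and_eq_true] at hc
      have hc0 := hc.1.1
      have hcne := hc.1.2
      have hcnm := hc.2
      have hnm : G[k].1 ∉ st.1 := by
        intro hmem
        rw [(PySem.Set.contains_iff _ _).mpr hmem] at hcnm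
        simp at hcnm
      have hne : G[k].1 ≠ "" := by simpa using hcne
      have hnull : NullSym G (G[k].1) := by
        apply count0_zero_null G k hk
        have := hc0
        rw [PySem.List.pyGetD_natCast] at this
        exact beq_iff_eq.mp this
      have hst' := ih (PySem.Set.add st.1 (G[k].1), G[k].1 :: st.2)
        (fun q hq => hval q (by simp [hq]))
        (PySem.Set.nodup_add _ _ hn1)
        (List.nodup_cons.mpr ⟨fun hm => hnm ((hiff _).mpr hm), hn2⟩)
        (by
          intro y
          rw [PySem.Set.mem_add]
          simp only [List.mem_cons]
          constructor
          · rintro (hy | hy)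
            · exact Or.inr ((hiff y).mp hy)
            · exact Or.inl hy
          · rintro (hy | hy)
            · exact Or.inr hy
            · exact Or.inl ((hiff y).mpr hy))
        (by
          intro y hy
          rcases (PySem.Set.mem_add _ _ _).mp hy with hy | hy
          · exact hsound y hy
          · subst hy; exact ⟨hnull, hne⟩)
      obtain ⟨c1, c2, c3, c4, c5, c6⟩ := hst'
      refine ⟨c1, c2, c3, c4, ?_, ?_⟩
      · intro y hy
        exact c5 y ((PySem.Set.mem_add _ _ _).mpr (Or.inl hy))
      · intro q hq
        rcases List.mem_cons.mp hq with hq | hq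
        · subst hq
          intro _
          exact Or.inr (c5 _ ((PySem.Set.mem_add _ _ _).mpr (Or.inr rfl)))
        · exact c6 q hq
    · rw [if_neg hc]
      have hst' := ih st (fun q hq => hval q (by simp [hq])) hn1 hn2 hiff hsound
      obtain ⟨c1, c2, c3, c4, c5, c6⟩ := hst'
      refine ⟨c1, c2, c3, c4, c5, ?_⟩
      intro q hq
      rcases List.mem_cons.mp hq with hq | hq
      · subst hq
        intro h0
        have hcf : (PySem.List.pyGetD (bCount0 G) ((k:Int), G[k]).1 0 == 0
            && (((k:Int), G[k]).2.1 != "") && !(PySem.Set.contains st.1 ((k:Int), G[k]).2.1)) = false := by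
          cases hb : (PySem.List.pyGetD (bCount0 G) ((k:Int), G[k]).1 0 == 0
            && (((k:Int), G[k]).2.1 != "") && !(PySem.Set.contains st.1 ((k:Int), G[k]).2.1))
          · rfl
          · exact absurd hb hc
        rw [h0] at hcf
        simp only [Bool.true_and, Bool.and_eq_false_iff] at hcf
        rcases hcf with hcf | hcf
        · left
          simpa using hcf
        · right
          apply c5
          cases hb : PySem.Set.contains st.1 (G[k].1)
          · rw [hb] at hcf
            exact absurd hcf (by simp)
          · exact (PySem.Set.contains_iff _ _).mp hb
      · exact c6 q hq

theorem mB_le (G : List (String × List String)) (nl : PySem.Set String) :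
    mB G nl ≤ G.length := by
  have h1 : (((G.map Prod.fst).dedup).filter (fun s => !(decide (s ∈ nl)))).length
      ≤ ((G.map Prod.fst).dedup).length := List.length_filter_le _ _
  have h2 : ((G.map Prod.fst).dedup).length ≤ (G.map Prod.fst).length :=
    (List.dedup_sublist _).length_le
  simp only [List.length_map] at h2
  simp only [mB]
  omega

theorem bNullable_spec (G : List (String × List String)) :
    (∀ y ∈ bNullable G, NullSym G y ∧ y ≠ "") ∧
    (∀ j : Nat, (hj : j < G.length) →
      (∀ s ∈ G[j].2, s = "" ∨ s ∈ bNullable G) →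
      (G[j].1 = "" ∨ G[j].1 ∈ bNullable G)) ∧
    (bNullable G).Nodup := by
  obtain ⟨c1, c2, c3, c4, c5, c6⟩ := bInitFold_spec G (PySem.List.enumerate G 0)
    (PySem.Set.empty, [])
    (by
      intro p hp
      obtain ⟨k, hk, hEq⟩ := (PySem.List.mem_enumerate_iff G 0 p).mp hp
      exact ⟨k, hk, by simpa using hEq⟩)
    List.nodup_nil List.nodup_nil (fun y => Iff.rfl) (by intro y hy; cases hy)
  have hbi : bInit G = (PySem.List.enumerate G 0).foldl (fun st p =>
      if PySem.List.pyGetD (bCount0 G) p.1 0 == 0 && p.2.1 != "" && !(PySem.Set.contains st.1 p.2.1)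
      then (PySem.Set.add st.1 p.2.1, p.2.1 :: st.2) else st) (PySem.Set.empty, []) := rfl
  rw [← hbi] at c1 c2 c3 c4 c5 c6
  have hF : FInv G [] (bCount0 G, (bInit G).1, (bInit G).2) := by
    refine ⟨c4, c2, fun y hy => (c3 y).mpr hy, c1, by simp [bCount0], ?_, ?_⟩
    · intro j hj
      have hpr : ∀ s, procP (bInit G).1 (bInit G).2 s = false := by
        intro s
        by_cases hs : s ∈ (bInit G).1
        · have : s ∈ (bInit G).2 := (c3 s).mp hs
          simp [procP, hs, this]
        · simp [procP, hs]
      have := cnt_all_unprocessed G (bInit G).1 (bInit G).2 hpr j hj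
      simp only [List.count_nil, Nat.add_zero]
      exact this.symm
    · intro j hj hval
      have hp : ((j : Int), G[j]) ∈ PySem.List.enumerate G 0 :=
        (PySem.List.mem_enumerate_iff G 0 _).mpr ⟨j, hj, by simp⟩
      have hcond : (PySem.List.pyGetD (bCount0 G) ((j : Int), G[j]).1 0 == 0) = true := by
        simp only [PySem.List.pyGetD_natCast]
        exact beq_iff_eq.mpr hval
      exact c6 _ hp hcond
  have hm : (bInit G).2.length + mB G (bInit G).1 ≤ (bInit G).2.length + G.length := by
    have := mB_le G (bInit G).1
    omega
  have hres : bNullable G = bLoop G ((bInit G).2.length + G.length)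
      (bCount0 G, (bInit G).1, (bInit G).2) := rfl
  obtain ⟨d1, d2, d3, _⟩ := bLoop_spec G ((bInit G).2.length + G.length)
    (bCount0 G, (bInit G).1, (bInit G).2) hF (by simpa using hm)
  rw [hres]
  exact ⟨d1, d2, d3⟩

theorem bNullable_complete (G : List (String × List String)) (x : String) :
    NullSym G x → x = "" ∨ x ∈ bNullable G := by
  intro h
  induction h with
  | eps => exact Or.inl rfl
  | step nt subs hmem hsubs ih =>
    obtain ⟨j, hj, hEq⟩ := List.getElem_of_mem hmem
    have hclosed := (bNullable_spec G).2.1 j hj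
    have hsubs' : ∀ s ∈ G[j].2, s = "" ∨ s ∈ bNullable G := by
      intro s hs
      apply ih
      rw [hEq] at hs
      exact hs
    have := hclosed hsubs'
    rw [hEq] at this
    exact this

theorem bNullable_char (G : List (String × List String)) (x : String) :
    x ∈ bNullable G ↔ (NullSym G x ∧ x ≠ "") := by
  constructor
  · exact (bNullable_spec G).1 x
  · rintro ⟨h1, h2⟩
    rcases bNullable_complete G x h1 with h | h
    · exact absurd h h2
    · exact h

-- ===== VERDICT (by name: the statement is the Claim_ definition above) =====
theorem eliminate_e_rules_spec : Claim_equal_eliminate_e_rules := by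
  intro G _
  unfold Spec_eliminate_e_rules
  show emitRules (closure_e G) G = emitRules (bNullable G) G
  apply emitRules_congr
  intro s
  rw [closure_e_char G s, bNullable_char G s]
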